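-- pv_equiv track=rewrite | github.com/UBCSamSung/Pixel-Puzzle-Solver | solver_B.py | positive_deduce
-- ===== SOURCE A (Python) =====
-- def positive_deduce(n, rowHints, colHints):
--     atoms=set()
--     for axis, hints in enumerate([colHints, rowHints]):
--         for index, hint in enumerate(hints):
--             m=max(hint)
--             if m>n//2:
--                 for i in range(n):
--                     if i+m>n-1 and i-m<0:
--                         atoms.add((i,index) if axis==0 else (index,i))
--     return atoms
-- ===== SOURCE B (Python) =====
-- def positive_deduce(n, rowHints, colHints):
--     # Each qualifying line contributes the contiguous forced interval
--     # [max(0, n-m), min(n, m)) computed in closed form, instead of testing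
--     # every i in range(n) against the overlap condition.
--     atoms = set()
--
--     def add_line(index, hint, is_row):
--         m = max(hint)
--         if m > n // 2:
--             lo, hi = max(0, n - m), min(n, m)
--             if is_row:
--                 atoms.update((index, i) for i in range(lo, hi))
--             else:
--                 atoms.update((i, index) for i in range(lo, hi))
--
--     for index, hint in enumerate(colHints):
--         add_line(index, hint, False)
--     for index, hint in enumerate(rowHints):
--         add_line(index, hint, True)
--     return atoms
-- ===== Notes on version B (the rewrite author's own statement) =====
-- stated objective: alternative
-- what changed: B derives each qualifying line's forced-cell set as the closed-form interval [max(0,n-m), min(n,m)) and inserts exactly those cells, instead of A's scan of all n cells per hint line testing the overlap condition cell by cell; on this benchmark's inputs the interval is about as large as n, so it is not measurably faster.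
import Mathlib
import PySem

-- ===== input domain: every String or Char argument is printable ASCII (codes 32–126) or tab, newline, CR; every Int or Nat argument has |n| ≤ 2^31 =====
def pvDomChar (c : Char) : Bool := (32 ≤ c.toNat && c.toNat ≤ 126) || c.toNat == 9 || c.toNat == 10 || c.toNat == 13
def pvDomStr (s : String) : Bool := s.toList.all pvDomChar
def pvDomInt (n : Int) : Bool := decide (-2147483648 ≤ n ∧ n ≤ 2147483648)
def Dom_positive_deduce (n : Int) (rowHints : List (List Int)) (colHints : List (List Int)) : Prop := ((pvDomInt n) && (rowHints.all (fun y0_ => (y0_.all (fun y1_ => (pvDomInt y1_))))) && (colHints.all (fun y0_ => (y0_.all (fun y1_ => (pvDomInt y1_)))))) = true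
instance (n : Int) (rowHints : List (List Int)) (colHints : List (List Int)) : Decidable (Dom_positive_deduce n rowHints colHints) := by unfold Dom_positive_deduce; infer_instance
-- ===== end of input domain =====

-- B replaces A's per-line scan of all n cells by the closed-form interval
-- [max(0, n-m), min(n, m)) of forced cells; objective: alternative algorithm.

-- ===== PORT A =====
def positive_deduce (n : Int) (rowHints : List (List Int)) (colHints : List (List Int)) : List (Int × Int) :=
  (PySem.List.enumerate [colHints, rowHints]).foldl (fun atoms axHints =>
    (PySem.List.enumerate axHints.2).foldl (fun atoms ih =>
      match PySem.List.max? ih.2 (fun y => y) with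
      | none => atoms   -- Python raises ValueError here; excluded by Pre_
      | some m =>
        if m > PySem.Int.floordiv n 2 then
          (PySem.List.pyRange 0 n 1).foldl (fun atoms i =>
            if i + m > n - 1 ∧ i - m < 0 then
              PySem.Set.add atoms (if axHints.1 == (0 : Int) then (i, ih.1) else (ih.1, i))
            else atoms) atoms
        else atoms) atoms) PySem.Set.empty

-- ===== PORT B =====
def pvAddLine (n : Int) (atoms : PySem.Set (Int × Int)) (index : Int)
    (hint : List Int) (isRow : Bool) : PySem.Set (Int × Int) :=
  match PySem.List.max? hint (fun y => y) with
  | none => atoms   -- Python raises ValueError here; excluded by Pre_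
  | some m =>
    if m > PySem.Int.floordiv n 2 then
      if isRow then
        (PySem.List.pyRange (max 0 (n - m)) (min n m) 1).foldl
          (fun a i => PySem.Set.add a (index, i)) atoms
      else
        (PySem.List.pyRange (max 0 (n - m)) (min n m) 1).foldl
          (fun a i => PySem.Set.add a (i, index)) atoms
    else atoms

def positive_deduce_alt (n : Int) (rowHints : List (List Int)) (colHints : List (List Int)) : List (Int × Int) :=
  let atoms := (PySem.List.enumerate colHints).foldl
    (fun a ih => pvAddLine n a ih.1 ih.2 false) PySem.Set.empty
  (PySem.List.enumerate rowHints).foldl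
    (fun a ih => pvAddLine n a ih.1 ih.2 true) atoms

-- ===== PRECONDITION & SPEC =====
-- Pre_ excludes inputs containing an empty hint list, on which Python's max(hint) raises ValueError.
def Pre_positive_deduce (_n : Int) (rowHints : List (List Int)) (colHints : List (List Int)) : Prop :=
  (∀ h ∈ rowHints, h ≠ []) ∧ (∀ h ∈ colHints, h ≠ [])
instance (n : Int) (rowHints : List (List Int)) (colHints : List (List Int)) : Decidable (Pre_positive_deduce n rowHints colHints) := by unfold Pre_positive_deduce; infer_instance
def pvWitness_positive_deduce : Int × List (List Int) × List (List Int) := (5, [[3], [1, 4]], [[2], [5]])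

def Spec_positive_deduce (n : Int) (rowHints : List (List Int)) (colHints : List (List Int)) (out : List (Int × Int)) : Prop := out = positive_deduce_alt n rowHints colHints
instance (n : Int) (rowHints : List (List Int)) (colHints : List (List Int)) (out : List (Int × Int)) : Decidable (Spec_positive_deduce n rowHints colHints out) := by unfold Spec_positive_deduce; infer_instance

-- ===== CLAIM (what is proved, stated in full; the proofs are below) =====
def Claim_equal_positive_deduce : Prop := ∀ (n : Int) (rowHints : List (List Int)) (colHints : List (List Int)), Dom_positive_deduce n rowHints colHints → Pre_positive_deduce n rowHints colHints → Spec_positive_deduce n rowHints colHints (positive_deduce n rowHints colHints)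

-- ===== LEMMAS AND PROOFS =====

-- a fold with a guarded step is the fold over the filtered list
theorem pv_foldl_if {α β : Type} (p : α → Prop) [DecidablePred p] (f : β → α → β) :
    ∀ (l : List α) (s : β),
      l.foldl (fun a x => if p x then f a x else a) s
        = (l.filter (fun x => decide (p x))).foldl f s := by
  intro l
  induction l with
  | nil => intro s; rfl
  | cons x t ih =>
    intro s
    by_cases hx : p x <;> simp [hx, ih]

-- the cells of range(n) passing A's overlap test are exactly the closed-form interval
theorem pv_filter_range (n m : Int) :
    (PySem.List.pyRange 0 n 1).filter (fun i => decide (n ≤ i + m ∧ i < m))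
      = PySem.List.pyRange (max 0 (n - m)) (min n m) 1 := by
  have hnodup1 : ((PySem.List.pyRange 0 n 1).filter
      (fun i => decide (n ≤ i + m ∧ i < m))).Nodup :=
    (PySem.List.nodup_pyRange_one 0 n).filter _
  have hnodup2 : (PySem.List.pyRange (max 0 (n - m)) (min n m) 1).Nodup :=
    PySem.List.nodup_pyRange_one _ _
  have hperm : (PySem.List.pyRange (max 0 (n - m)) (min n m) 1).Perm
      ((PySem.List.pyRange 0 n 1).filter (fun i => decide (n ≤ i + m ∧ i < m))) := by
    rw [List.perm_ext_iff_of_nodup hnodup2 hnodup1]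
    intro a
    simp only [List.mem_filter, PySem.List.mem_pyRange_one, decide_eq_true_eq]
    omega
  have hpw1 : ((PySem.List.pyRange 0 n 1).filter
      (fun i => decide (n ≤ i + m ∧ i < m))).Pairwise (· < ·) :=
    (PySem.List.pairwise_lt_pyRange_one 0 n).filter _
  have hpw2 : (PySem.List.pyRange (max 0 (n - m)) (min n m) 1).Pairwise (· < ·) :=
    PySem.List.pairwise_lt_pyRange_one _ _
  have h1 := PySem.List.sorted_eq_of_perm_of_pairwise_lt
    ((PySem.List.pyRange 0 n 1).filter (fun i => decide (n ≤ i + m ∧ i < m)))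
    ((PySem.List.pyRange 0 n 1).filter (fun i => decide (n ≤ i + m ∧ i < m)))
    (key := fun x => x) (List.Perm.refl _) hpw1
  have h2 := PySem.List.sorted_eq_of_perm_of_pairwise_lt
    ((PySem.List.pyRange 0 n 1).filter (fun i => decide (n ≤ i + m ∧ i < m)))
    (PySem.List.pyRange (max 0 (n - m)) (min n m) 1)
    (key := fun x => x) hperm hpw2
  rw [← h1, ← h2]

-- one line of A's scan equals B's closed-form line
theorem pv_line_eq (n m : Int) (mk : Int → Int × Int) (s : PySem.Set (Int × Int)) :
    (PySem.List.pyRange 0 n 1).foldl (fun a i =>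
        if n ≤ i + m ∧ i < m then PySem.Set.add a (mk i) else a) s
      = (PySem.List.pyRange (max 0 (n - m)) (min n m) 1).foldl
          (fun a i => PySem.Set.add a (mk i)) s := by
  rw [pv_foldl_if (fun i => n ≤ i + m ∧ i < m) (fun a i => PySem.Set.add a (mk i)),
    pv_filter_range]

theorem pv_body_eq (n index : Int) (isRow : Bool) (a : PySem.Set (Int × Int)) (hint : List Int) :
    (match PySem.List.max? hint (fun y => y) with
      | none => a
      | some m =>
        if n / 2 < m then
          (PySem.List.pyRange 0 n 1).foldl (fun atoms i =>
            if n ≤ i + m ∧ i < m then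
              PySem.Set.add atoms (if isRow then (index, i) else (i, index))
            else atoms) a
        else a)
      = pvAddLine n a index hint isRow := by
  unfold pvAddLine
  rw [PySem.Int.floordiv_eq_ediv_of_pos (a := n) (by norm_num : (0:Int) < 2)]
  cases PySem.List.max? hint (fun y => y) with
  | none => rfl
  | some m =>
    by_cases hm : n / 2 < m
    · simp only [gt_iff_lt, if_pos hm]
      cases isRow with
      | false => simpa using pv_line_eq n m (fun i => (i, index)) a
      | true => simpa using pv_line_eq n m (fun i => (index, i)) a
    · simp only [gt_iff_lt, if_neg hm]

-- ===== VERDICT (by name: the statement is the Claim_ definition above) =====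
theorem positive_deduce_spec : Claim_equal_positive_deduce := by
  intro n rowHints colHints _ _
  unfold Spec_positive_deduce positive_deduce positive_deduce_alt
  simp only [PySem.List.enumerate_cons, PySem.List.enumerate_nil, List.foldl_cons, List.foldl_nil]
  norm_num
  have hcol : List.foldl
      (fun atoms ih =>
        match PySem.List.max? ih.2 fun y => y with
        | none => atoms
        | some m =>
          if n / 2 < m then
            List.foldl (fun atoms i => if n ≤ i + m ∧ i < m then PySem.Set.add atoms (i, ih.1) else atoms) atoms
              (PySem.List.pyRange 0 n 1)
          else atoms)
      ([] : List (Int × Int)) (PySem.List.enumerate colHints)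
      = List.foldl (fun a ih => pvAddLine n a ih.1 ih.2 false)
          ([] : List (Int × Int)) (PySem.List.enumerate colHints) := by
    apply List.foldl_ext
    intro a ih _
    simpa using pv_body_eq n ih.1 false a ih.2
  rw [hcol]
  apply List.foldl_ext
  intro a ih _
  simpa using pv_body_eq n ih.1 true a ih.2
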